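-- pv_equiv track=rewrite | github.com/ZeVicTech/Algorithm | 프로그래머스/1/42862. 체육복/체육복.py | solution
-- ===== SOURCE A (Python) =====
-- def solution(n, lost, reserve):
--     lost.sort()
--     reserve.sort()
--
--     student = [1 for _ in range(n)]
--
--     for l in lost:
--         student[l-1] -= 1
--
--     for r in reserve:
--         student[r-1] += 1
--
--     for i in range(n):
--         if student[i] == 2:
--             if i - 1 >= 0 and student[i-1] == 0:
--                 student[i-1] += 1
--                 student[i] -= 1
--             elif i + 1 <= n - 1 and student[i+1] == 0:
--                 student[i+1] += 1
--                 student[i] -= 1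
--             else:
--                 continue
--
--     return n - student.count(0)
-- ===== SOURCE B (Python) =====
-- # Per-student balance array, then a two-pointer matching over the increasing need/spare position
-- # lists instead of A's in-place sorting plus stateful adjacent-lending scan.
-- # Equivalence is about the return value: A sorts `lost` and `reserve` in place, B does not mutate them.
-- def solution(n, lost, reserve):
--     balance = [0] * n
--     for x in lost:
--         balance[x - 1] -= 1
--     for x in reserve:
--         balance[x - 1] += 1
--     need = [i for i, b in enumerate(balance) if b == -1]
--     spare = [i for i, b in enumerate(balance) if b == 1]
--     matched = 0
--     i = j = 0
--     while i < len(need) and j < len(spare):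
--         if abs(need[i] - spare[j]) <= 1:
--             matched += 1
--             i += 1
--             j += 1
--         elif need[i] < spare[j]:
--             i += 1
--         else:
--             j += 1
--     return n - len(need) + matched
-- ===== Notes on version B (the rewrite author's own statement) =====
-- stated objective: alternative
-- what changed: Keeps a per-student balance array but drops A's in-place sorting of the arguments and replaces its stateful adjacent-lending scan (borrow from position i-1, else i+1, mutating the array) by extracting the increasing need/spare position lists and counting matched pairs with a linear two-pointer merge: answer = n - len(need) + matched.
import Mathlib
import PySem

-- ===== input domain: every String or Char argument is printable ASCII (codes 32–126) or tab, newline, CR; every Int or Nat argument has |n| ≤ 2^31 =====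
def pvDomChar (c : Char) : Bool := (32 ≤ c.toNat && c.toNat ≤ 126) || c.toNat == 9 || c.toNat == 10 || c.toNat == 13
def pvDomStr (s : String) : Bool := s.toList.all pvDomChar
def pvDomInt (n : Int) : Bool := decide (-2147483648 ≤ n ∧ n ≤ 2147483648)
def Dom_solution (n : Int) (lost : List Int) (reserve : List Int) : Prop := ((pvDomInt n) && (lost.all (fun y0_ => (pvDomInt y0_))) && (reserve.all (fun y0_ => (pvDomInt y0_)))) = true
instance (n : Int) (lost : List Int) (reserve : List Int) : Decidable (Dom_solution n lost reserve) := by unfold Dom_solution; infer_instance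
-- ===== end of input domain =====

-- B keeps a per-student balance array but replaces A's in-place sorting and stateful
-- adjacent-lending scan by a linear two-pointer matching over the increasing need/spare position
-- lists.  Equivalence is about the return value: the Python A sorts `lost` and `reserve` in
-- place, B does not mutate its arguments.

-- ===== PORT A =====
-- Python's list is an array with O(1) indexing, so the student list is ported as Array Int;
-- pyAGetD/pyASetD are Python's xs[i] / xs[i]=v (negative-index rule, none = IndexError made
-- total: exact on the in-range indices Pre_solution admits, like PySem.List.pyGetD/pySetD).
def pyAGetD (xs : Array Int) (i : Int) (d : Int) : Int :=
  match PySem.List.pyIdx? xs.size i with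
  | some k => xs.getD k d
  | none => d

def pyASetD (xs : Array Int) (i : Int) (v : Int) : Array Int :=
  match PySem.List.pyIdx? xs.size i with
  | some k => xs.setIfInBounds k v
  | none => xs

-- the body of A's third loop (the greedy pass), named so the proofs can refer to it
def stepA (n : Int) (s : Array Int) (i : Int) : Array Int :=
  if pyAGetD s i 0 = 2 then
    if 0 ≤ i - 1 ∧ pyAGetD s (i - 1) 0 = 0 then
      let s1 := pyASetD s (i - 1) (pyAGetD s (i - 1) 0 + 1)
      pyASetD s1 i (pyAGetD s1 i 0 - 1)
    else if i + 1 ≤ n - 1 ∧ pyAGetD s (i + 1) 0 = 0 then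
      let s1 := pyASetD s (i + 1) (pyAGetD s (i + 1) 0 + 1)
      pyASetD s1 i (pyAGetD s1 i 0 - 1)
    else s
  else s

def solution (n : Int) (lost : List Int) (reserve : List Int) : Int :=
  -- lost.sort(); reserve.sort()  (in-place in Python; here we continue with the sorted lists)
  let lostS := PySem.List.sorted lost (fun x => x)
  let reserveS := PySem.List.sorted reserve (fun x => x)
  -- student = [1 for _ in range(n)]
  let student := ((PySem.List.pyRange 0 n).map (fun _ => (1 : Int))).toArray
  -- for l in lost: student[l-1] -= 1
  let student := lostS.foldl (fun s l => pyASetD s (l - 1) (pyAGetD s (l - 1) 0 - 1)) student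
  -- for r in reserve: student[r-1] += 1
  let student := reserveS.foldl (fun s r => pyASetD s (r - 1) (pyAGetD s (r - 1) 0 + 1)) student
  -- for i in range(n): ... (stepA is that loop body, verbatim)
  let student := (PySem.List.pyRange 0 n).foldl (stepA n) student
  n - (PySem.List.count student.toList 0 : Int)

-- ===== PORT B =====
-- B's while loop walks the suffixes need[i:], spare[j:] with a matched counter; ported as the
-- structural recursion on those two suffixes (matched is the accumulated result).
def twoPtr : List Int → List Int → Int
  | [], _ => 0
  | _ :: _, [] => 0
  | l :: L, r :: R =>
    if (l - r).natAbs ≤ 1 then 1 + twoPtr L R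
    else if l < r then twoPtr L (r :: R)
    else twoPtr (l :: L) R
termination_by L R => L.length + R.length
decreasing_by all_goals (simp; try omega)

def solution_alt (n : Int) (lost : List Int) (reserve : List Int) : Int :=
  -- balance = [0] * n
  let balance := (List.replicate n.toNat (0 : Int)).toArray
  -- for x in lost: balance[x-1] -= 1
  let balance := lost.foldl (fun b x => pyASetD b (x - 1) (pyAGetD b (x - 1) 0 - 1)) balance
  -- for x in reserve: balance[x-1] += 1
  let balance := reserve.foldl (fun b x => pyASetD b (x - 1) (pyAGetD b (x - 1) 0 + 1)) balance
  -- need / spare = [i for i, b in enumerate(balance) if b == -1 / 1]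
  let need := ((balance.toList.zipIdx.filter (fun p => p.1 == (-1 : Int))).map (fun p => ((p.2 : Nat) : Int)))
  let spare := ((balance.toList.zipIdx.filter (fun p => p.1 == (1 : Int))).map (fun p => ((p.2 : Nat) : Int)))
  -- the two-pointer matching loop; then: return n - len(need) + matched
  n - (need.length : Int) + twoPtr need spare

-- ===== PRECONDITION & SPEC =====
-- Pre_ admits exactly the inputs A returns on: every entry x must give an in-range index
-- x-1 for Python's list indexing (1-n ≤ x ≤ n); on any other entry A raises IndexError.
def Pre_solution (n : Int) (lost : List Int) (reserve : List Int) : Prop :=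
  (∀ x ∈ lost, 1 - n ≤ x ∧ x ≤ n) ∧ (∀ x ∈ reserve, 1 - n ≤ x ∧ x ≤ n)
instance (n : Int) (lost : List Int) (reserve : List Int) : Decidable (Pre_solution n lost reserve) := by unfold Pre_solution; infer_instance
def pvWitness_solution : Int × List Int × List Int := (5, [2, 4], [3])

def Spec_solution (n : Int) (lost : List Int) (reserve : List Int) (out : Int) : Prop := out = solution_alt n lost reserve
instance (n : Int) (lost : List Int) (reserve : List Int) (out : Int) : Decidable (Spec_solution n lost reserve out) := by unfold Spec_solution; infer_instance

-- ===== CLAIM (what is proved, stated in full; the proofs are below) =====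
def Claim_equal_solution : Prop := ∀ (n : Int) (lost : List Int) (reserve : List Int), Dom_solution n lost reserve → Pre_solution n lost reserve → Spec_solution n lost reserve (solution n lost reserve)

-- ===== LEMMAS AND PROOFS =====

-- net effect of the lost/reserve entries on array position v
def cntP (lost reserve : List Int) (N : Nat) (v : Int) : Int :=
  (reserve.countP (fun x => PySem.Int.mod (x - 1) (N : Int) == v) : Int)
    - (lost.countP (fun x => PySem.Int.mod (x - 1) (N : Int) == v) : Int)

-- list-level mirror of stepA; the proofs work on it and transfer along Array.toList
def stepAL (n : Int) (s : List Int) (i : Int) : List Int :=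
  if PySem.List.pyGetD s i 0 = 2 then
    if 0 ≤ i - 1 ∧ PySem.List.pyGetD s (i - 1) 0 = 0 then
      let s1 := PySem.List.pySetD s (i - 1) (PySem.List.pyGetD s (i - 1) 0 + 1)
      PySem.List.pySetD s1 i (PySem.List.pyGetD s1 i 0 - 1)
    else if i + 1 ≤ n - 1 ∧ PySem.List.pyGetD s (i + 1) 0 = 0 then
      let s1 := PySem.List.pySetD s (i + 1) (PySem.List.pyGetD s (i + 1) 0 + 1)
      PySem.List.pySetD s1 i (PySem.List.pyGetD s1 i 0 - 1)
    else s
  else s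

-- abstract form of A's greedy pass on the zero/two position sets (used only by the proofs)
def stepB (z : List Int) (x : Int) : List Int :=
  if x - 1 ∈ z then PySem.Set.discard z (x - 1)
  else if x + 1 ∈ z then PySem.Set.discard z (x + 1)
  else z

lemma pyAGetD_toList (xs : Array Int) (i d : Int) :
    pyAGetD xs i d = PySem.List.pyGetD xs.toList i d := by
  unfold pyAGetD
  simp only [PySem.List.pyGetD, PySem.List.pyGet?, Array.length_toList]
  cases PySem.List.pyIdx? xs.size i with
  | none => rfl
  | some k =>
    rcases Nat.lt_or_ge k xs.size with h | h
    · simp [Array.getD, h, (by simpa using h : k < xs.toList.length)]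
    · simp [Array.getD, Nat.not_lt.2 h,
        List.getElem?_eq_none (by simpa using h : xs.toList.length ≤ k)]

lemma pyASetD_toList (xs : Array Int) (i v : Int) :
    (pyASetD xs i v).toList = PySem.List.pySetD xs.toList i v := by
  unfold pyASetD
  simp only [PySem.List.pySetD, PySem.List.pySet?, Array.length_toList]
  cases PySem.List.pyIdx? xs.size i with
  | none => rfl
  | some k => simp [Array.toList_setIfInBounds]

lemma stepA_toList (n : Int) (s : Array Int) (i : Int) :
    (stepA n s i).toList = stepAL n s.toList i := by
  unfold stepA stepAL
  simp only [pyAGetD_toList, pyASetD_toList]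
  split_ifs <;>
    simp_all [pyAGetD_toList, pyASetD_toList]

lemma foldl_toList (f : Array Int → Int → Array Int) (g : List Int → Int → List Int)
    (h : ∀ a x, (f a x).toList = g a.toList x) :
    ∀ (L : List Int) (a : Array Int), (L.foldl f a).toList = L.foldl g a.toList := by
  intro L
  induction L with
  | nil => intro a; rfl
  | cons x L ih =>
    intro a
    simp only [List.foldl_cons, ih, h]

lemma getD_set_ite (s : List Int) (a b : Nat) (v : Int) (h : a < s.length) :
    (s.set a v).getD b 0 = if b = a then v else s.getD b 0 := by
  rcases eq_or_ne b a with rfl | hne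
  · simp [List.getD, h]
  · simp [List.getD, hne]
    rw [List.getElem?_set_ne (Ne.symm hne)]

-- Python's xs[i] / xs[i] = v for an in-range index i, possibly negative: position (i % len)
lemma pyGetD_mod (xs : List Int) (i : Int) (d : Int)
    (h0 : -(xs.length : Int) ≤ i) (h1 : i < (xs.length : Int)) :
    PySem.List.pyGetD xs i d = xs.getD (PySem.Int.mod i (xs.length : Int)).toNat d := by
  have hfm : PySem.Int.mod i (xs.length : Int) = i % (xs.length : Int) := by
    show Int.fmod i (xs.length : Int) = _
    rw [Int.fmod_eq_emod, if_pos (Or.inl (by positivity)), add_zero]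
  rw [hfm]
  simp only [PySem.List.pyGetD, PySem.List.pyGet?, PySem.List.pyIdx?, List.getD_eq_getElem?_getD]
  by_cases hp : 0 ≤ i
  · rw [if_pos hp, if_pos h1]
    have : i % (xs.length : Int) = i := Int.emod_eq_of_lt hp h1
    rw [this]
    rfl
  · rw [if_neg hp, if_pos h0]
    have hlpos : 0 < (xs.length : Int) := by omega
    have : (i % (xs.length : Int)).toNat = xs.length - (-i).toNat := by
      have h2 := Int.emod_nonneg i (by omega : (xs.length : Int) ≠ 0)
      have h3 : i % (xs.length : Int) = i + xs.length := by
        have hself : (i + (xs.length : Int)) % (xs.length : Int) = i % (xs.length : Int) :=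
          Int.add_mul_emod_self_left (a := i) (b := (xs.length : Int)) (c := 1) ▸ by ring_nf
        rw [← hself]
        exact Int.emod_eq_of_lt (by omega) (by omega)
      omega
    rw [this]
    rfl

lemma pySetD_mod (xs : List Int) (i : Int) (v : Int)
    (h0 : -(xs.length : Int) ≤ i) (h1 : i < (xs.length : Int)) :
    PySem.List.pySetD xs i v = xs.set (PySem.Int.mod i (xs.length : Int)).toNat v := by
  have hfm : PySem.Int.mod i (xs.length : Int) = i % (xs.length : Int) := by
    show Int.fmod i (xs.length : Int) = _
    rw [Int.fmod_eq_emod, if_pos (Or.inl (by positivity)), add_zero]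
  rw [hfm]
  simp only [PySem.List.pySetD, PySem.List.pySet?, PySem.List.pyIdx?]
  by_cases hp : 0 ≤ i
  · rw [if_pos hp, if_pos h1]
    have : i % (xs.length : Int) = i := Int.emod_eq_of_lt hp h1
    rw [this]
    rfl
  · rw [if_neg hp, if_pos h0]
    have h2 := Int.emod_nonneg i (by omega : (xs.length : Int) ≠ 0)
    have h3 : i % (xs.length : Int) = i + xs.length := by
      have hself : (i + (xs.length : Int)) % (xs.length : Int) = i % (xs.length : Int) :=
        Int.add_mul_emod_self_left (a := i) (b := (xs.length : Int)) (c := 1) ▸ by ring_nf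
      rw [← hself]
      exact Int.emod_eq_of_lt (by omega) (by omega)
    have : (i % (xs.length : Int)).toNat = xs.length - (-i).toNat := by omega
    rw [this]
    rfl

lemma mod_bounds (i N : Int) (h : 0 < N) :
    0 ≤ PySem.Int.mod i N ∧ PySem.Int.mod i N < N :=
  ⟨PySem.Int.mod_nonneg i h, PySem.Int.mod_lt i h⟩

lemma build_fold (δ : Int) (L : List Int) : ∀ (s : List Int),
    (∀ x ∈ L, 1 - (s.length : Int) ≤ x ∧ x ≤ (s.length : Int)) →
    (L.foldl (fun t l => PySem.List.pySetD t (l - 1) (PySem.List.pyGetD t (l - 1) 0 + δ)) s).length = s.length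
    ∧ ∀ j : Nat, j < s.length →
      (L.foldl (fun t l => PySem.List.pySetD t (l - 1) (PySem.List.pyGetD t (l - 1) 0 + δ)) s).getD j 0
        = s.getD j 0
          + δ * (L.countP (fun x => PySem.Int.mod (x - 1) (s.length : Int) == (j : Int)) : Int) := by
  induction L with
  | nil => intro s _; simp
  | cons a L ih =>
    intro s hb
    obtain ⟨ha1, ha2⟩ := hb a (List.mem_cons_self ..)
    have hNpos : 0 < (s.length : Int) := by omega
    obtain ⟨hm0, hm1⟩ := mod_bounds (a - 1) (s.length : Int) hNpos
    have hpi : PySem.Int.mod (a - 1) (s.length : Int)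
        = (((PySem.Int.mod (a - 1) (s.length : Int)).toNat : Nat) : Int) := by omega
    have hlt : (PySem.Int.mod (a - 1) (s.length : Int)).toNat < s.length := by omega
    have hset : PySem.List.pySetD s (a - 1) (PySem.List.pyGetD s (a - 1) 0 + δ)
        = s.set (PySem.Int.mod (a - 1) (s.length : Int)).toNat
            (s.getD (PySem.Int.mod (a - 1) (s.length : Int)).toNat 0 + δ) := by
      rw [pySetD_mod s (a - 1) _ (by omega) (by omega),
        pyGetD_mod s (a - 1) 0 (by omega) (by omega)]
    have hlen : (PySem.List.pySetD s (a - 1) (PySem.List.pyGetD s (a - 1) 0 + δ)).length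
        = s.length := PySem.List.length_pySetD ..
    have hget : ∀ j : Nat, j < s.length →
        (PySem.List.pySetD s (a - 1) (PySem.List.pyGetD s (a - 1) 0 + δ)).getD j 0
          = s.getD j 0
            + (if PySem.Int.mod (a - 1) (s.length : Int) = (j : Int) then δ else 0) := by
      intro j hj
      rw [hset, getD_set_ite _ _ _ _ hlt]
      rcases eq_or_ne j (PySem.Int.mod (a - 1) (s.length : Int)).toNat with rfl | hne
      · rw [if_pos rfl, if_pos (by omega)]
      · rw [if_neg hne, if_neg (by omega)]
        ring
    obtain ⟨ihl, ihg⟩ := ih (PySem.List.pySetD s (a - 1) (PySem.List.pyGetD s (a - 1) 0 + δ))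
      (by rw [hlen]; exact fun x hx => hb x (List.mem_cons_of_mem _ hx))
    simp only [hlen] at ihl ihg
    constructor
    · simpa using ihl
    · intro j hj
      simp only [List.foldl_cons]
      rw [ihg j hj, hget j hj, List.countP_cons]
      rcases eq_or_ne (PySem.Int.mod (a - 1) (s.length : Int)) ((j : Int)) with he | hne
      · simp [he]
        ring
      · simp [hne]

lemma count_range (s : List Int) (v : Int) :
    List.count v s = ((List.range s.length).filter (fun j => s.getD j 0 == v)).length := by
  induction s with
  | nil => simp
  | cons a t ih =>
    simp only [List.length_cons, List.range_succ_eq_map, List.filter_cons, List.filter_map,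
      List.count_cons, List.getD_cons_zero]
    rcases eq_or_ne a v with rfl | hne
    · simp [ih, Function.comp_def, Nat.add_comm]
    · simp [ih, hne, Function.comp_def]

lemma count_zero_eq_length (s z : List Int) (hnd : z.Nodup)
    (hz : ∀ x : Int, x ∈ z ↔ ∃ j : Nat, j < s.length ∧ x = (j : Int) ∧ s.getD j 0 = 0) :
    (List.count 0 s : Int) = (z.length : Int) := by
  have hmapnd : (z.map (fun x => x.toNat)).Nodup := by
    refine List.Nodup.map_on ?_ hnd
    intro x hx y hy hxy
    obtain ⟨jx, _, rfl, _⟩ := (hz x).1 hx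
    obtain ⟨jy, _, rfl, _⟩ := (hz y).1 hy
    omega
  have hfnd : ((List.range s.length).filter (fun j => s.getD j 0 == 0)).Nodup :=
    (List.nodup_range).filter _
  have hperm : (z.map (fun x => x.toNat)).Perm
      ((List.range s.length).filter (fun j => s.getD j 0 == 0)) := by
    rw [List.perm_ext_iff_of_nodup hmapnd hfnd]
    intro j
    simp only [List.mem_map, List.mem_filter, List.mem_range, beq_iff_eq]
    constructor
    · rintro ⟨x, hx, rfl⟩
      obtain ⟨jx, hjx, rfl, h0⟩ := (hz x).1 hx
      have he : ((jx : Int)).toNat = jx := by omega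
      rw [he]
      exact ⟨hjx, h0⟩
    · rintro ⟨hj, h0⟩
      exact ⟨(j : Int), (hz _).2 ⟨j, hj, rfl, h0⟩, by omega⟩
  have hle := hperm.length_eq
  rw [List.length_map] at hle
  rw [count_range s 0, ← hle]

lemma greedy_core (N : Nat) : ∀ (m k : Nat) (s z T : List Int),
    k + m = N → s.length = N → z.Nodup → T.Pairwise (· < ·) →
    (∀ x ∈ T, (k : Int) ≤ x ∧ x < (N : Int)) →
    (∀ x : Int, x ∈ z ↔ ∃ j : Nat, j < N ∧ x = (j : Int) ∧ s.getD j 0 = 0) →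
    (∀ j : Nat, k ≤ j → j < N → (s.getD j 0 = 2 ↔ ((j : Int)) ∈ T)) →
    (List.count 0 (((List.range' k m).map (Nat.cast : Nat → Int)).foldl (stepAL (N : Int)) s) : Int)
      = ((T.foldl stepB z).length : Int) := by
  intro m
  induction m with
  | zero =>
    intro k s z T hkm hlen hnd hpw hbound hz hT
    have hTnil : T = [] := by
      cases T with
      | nil => rfl
      | cons a T' =>
        have := hbound a (List.mem_cons_self ..)
        omega
    subst hTnil
    rw [show ((List.range' k 0).map (Nat.cast : Nat → Int)).foldl (stepAL (N : Int)) s = s from rfl]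
    exact count_zero_eq_length s z hnd (by rw [hlen]; exact hz)
  | succ m ih =>
    intro k s z T hkm hlen hnd hpw hbound hz hT
    have hkN : k < N := by omega
    rw [List.range'_succ]
    simp only [List.map_cons, List.foldl_cons]
    by_cases h2 : s.getD k 0 = 2
    · -- the loop lends at index k
      have hmemT : ((k : Int)) ∈ T := (hT k le_rfl hkN).1 h2
      obtain ⟨a, T', rfl⟩ : ∃ a T', T = a :: T' := by
        cases T with
        | nil => simp at hmemT
        | cons a T' => exact ⟨a, T', rfl⟩
      obtain ⟨hlta, hbnds⟩ := List.pairwise_cons.1 hpw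
      have hak : a = (k : Int) := by
        rcases List.mem_cons.1 hmemT with h | h
        · omega
        · have := hlta _ h
          have := (hbound a (List.mem_cons_self ..)).1
          omega
      subst hak
      have hbound' : ∀ x ∈ T', ((k + 1 : Nat) : Int) ≤ x ∧ x < (N : Int) := by
        intro x hx
        have h1 := hlta x hx
        have h2 := (hbound x (List.mem_cons_of_mem _ hx)).2
        push_cast
        omega
      simp only [List.foldl_cons]
      by_cases hz1 : ((k : Int) - 1) ∈ z
      · -- lend to the left: position k-1 holds a student with 0 uniforms
        obtain ⟨j, hjN, hkj, hj0⟩ := (hz _).1 hz1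
        have hj : j = k - 1 := by omega
        have hk1 : 1 ≤ k := by omega
        subst hj
        have e1 : ((k : Int) - 1) = ((k - 1 : Nat) : Int) := by omega
        have hlt1 : k - 1 < s.length := by omega
        have hltk : k < s.length := by omega
        have hA : stepAL (N : Int) s (k : Int) = (s.set (k - 1) 1).set k 1 := by
          unfold stepAL
          rw [e1]
          simp only [PySem.List.pyGetD_natCast, PySem.List.pySetD_natCast]
          rw [if_pos h2, if_pos ⟨by omega, hj0⟩, hj0,
            getD_set_ite _ _ _ _ hlt1, if_neg (by omega), h2]
          norm_num
        have hB : stepB z ((k : Int)) = PySem.Set.discard z ((k : Int) - 1) := by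
          unfold stepB
          rw [if_pos hz1]
        rw [hA, hB]
        have hs'' : ∀ i : Nat, i < N →
            ((s.set (k - 1) 1).set k 1).getD i 0
              = if i = k then 1 else if i = k - 1 then 1 else s.getD i 0 := by
          intro i hi
          rw [getD_set_ite _ _ _ _ (by simp; omega), getD_set_ite _ _ _ _ hlt1]
        apply ih (k + 1) _ _ _ (by omega) (by simp [hlen]) (PySem.Set.nodup_discard _ _ hnd)
          (List.pairwise_cons.1 hpw).2 hbound'
        · intro x
          rw [PySem.Set.mem_discard]
          constructor
          · rintro ⟨hxz, hxk⟩
            obtain ⟨j, hjN', rfl, hj0'⟩ := (hz x).1 hxz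
            refine ⟨j, hjN', rfl, ?_⟩
            rw [hs'' j hjN', if_neg (fun hjk => by subst hjk; omega),
              if_neg (by omega)]
            exact hj0'
          · rintro ⟨j, hjN', rfl, hj0'⟩
            rw [hs'' j hjN'] at hj0'
            by_cases hjk : j = k
            · rw [if_pos hjk] at hj0'; omega
            · rw [if_neg hjk] at hj0'
              by_cases hjk1 : j = k - 1
              · rw [if_pos hjk1] at hj0'; omega
              · rw [if_neg hjk1] at hj0'
                exact ⟨(hz _).2 ⟨j, hjN', rfl, hj0'⟩, by omega⟩
        · intro j hj hjN'
          rw [hs'' j hjN', if_neg (by omega), if_neg (by omega)]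
          rw [hT j (by omega) hjN', List.mem_cons]
          constructor
          · rintro (h | h)
            · omega
            · exact h
          · intro h; exact Or.inr h
      · by_cases hz2 : ((k : Int) + 1) ∈ z
        · -- lend to the right: position k+1 holds a student with 0 uniforms
          obtain ⟨j, hjN, hkj, hj0⟩ := (hz _).1 hz2
          have hj : j = k + 1 := by omega
          subst hj
          have e1 : ((k : Int) + 1) = ((k + 1 : Nat) : Int) := by omega
          have hlt1 : k + 1 < s.length := by omega
          have hltk : k < s.length := by omega
          have hA : stepAL (N : Int) s (k : Int) = (s.set (k + 1) 1).set k 1 := by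
            unfold stepAL
            have hnc1 : ¬ (0 ≤ (k : Int) - 1 ∧ PySem.List.pyGetD s ((k : Int) - 1) 0 = 0) := by
              rintro ⟨hge, hget⟩
              have hk1 : 1 ≤ k := by omega
              rw [(by omega : ((k : Int) - 1) = ((k - 1 : Nat) : Int)),
                PySem.List.pyGetD_natCast] at hget
              exact hz1 ((hz _).2 ⟨k - 1, by omega, by omega, hget⟩)
            rw [e1]
            simp only [PySem.List.pyGetD_natCast, PySem.List.pySetD_natCast]
            rw [if_pos h2, if_neg hnc1, if_pos ⟨by omega, hj0⟩, hj0,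
              getD_set_ite _ _ _ _ hlt1, if_neg (by omega), h2]
            norm_num
          have hB : stepB z ((k : Int)) = PySem.Set.discard z ((k : Int) + 1) := by
            unfold stepB
            rw [if_neg hz1, if_pos hz2]
          rw [hA, hB]
          have hs'' : ∀ i : Nat, i < N →
              ((s.set (k + 1) 1).set k 1).getD i 0
                = if i = k then 1 else if i = k + 1 then 1 else s.getD i 0 := by
            intro i hi
            rw [getD_set_ite _ _ _ _ (by simp; omega), getD_set_ite _ _ _ _ hlt1]
          have hnotT : ((k : Int) + 1) ∉ T' := by
            intro hmem
            have := (hT (k + 1) (by omega) (by omega)).2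
              (by rw [(by push_cast; ring : ((k + 1 : Nat) : Int) = (k : Int) + 1)]
                  exact List.mem_cons_of_mem _ hmem)
            omega
          apply ih (k + 1) _ _ _ (by omega) (by simp [hlen]) (PySem.Set.nodup_discard _ _ hnd)
            (List.pairwise_cons.1 hpw).2 hbound'
          · intro x
            rw [PySem.Set.mem_discard]
            constructor
            · rintro ⟨hxz, hxk⟩
              obtain ⟨j, hjN', rfl, hj0'⟩ := (hz x).1 hxz
              refine ⟨j, hjN', rfl, ?_⟩
              rw [hs'' j hjN', if_neg (fun hjk => by subst hjk; omega),
                if_neg (by omega)]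
              exact hj0'
            · rintro ⟨j, hjN', rfl, hj0'⟩
              rw [hs'' j hjN'] at hj0'
              by_cases hjk : j = k
              · subst hjk; rw [if_pos rfl] at hj0'; omega
              · rw [if_neg hjk] at hj0'
                by_cases hjk1 : j = k + 1
                · rw [if_pos hjk1] at hj0'; omega
                · rw [if_neg hjk1] at hj0'
                  exact ⟨(hz _).2 ⟨j, hjN', rfl, hj0'⟩, by omega⟩
          · intro j hj hjN'
            rw [hs'' j hjN', if_neg (by omega)]
            by_cases hjk1 : j = k + 1
            · subst hjk1
              rw [if_pos rfl]
              constructor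
              · intro h; omega
              · intro h
                rw [show ((k + 1 : Nat) : Int) = (k : Int) + 1 from by push_cast; ring] at h
                exact absurd h hnotT
            · rw [if_neg hjk1]
              rw [hT j (by omega) hjN', List.mem_cons]
              constructor
              · rintro (h | h)
                · omega
                · exact h
              · intro h; exact Or.inr h
        · -- nobody adjacent to lend to: state unchanged
          have hA : stepAL (N : Int) s (k : Int) = s := by
            unfold stepAL
            have hnc1 : ¬ (0 ≤ (k : Int) - 1 ∧ PySem.List.pyGetD s ((k : Int) - 1) 0 = 0) := by
              rintro ⟨hge, hget⟩
              have hk1 : 1 ≤ k := by omega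
              rw [(by omega : ((k : Int) - 1) = ((k - 1 : Nat) : Int)),
                PySem.List.pyGetD_natCast] at hget
              exact hz1 ((hz _).2 ⟨k - 1, by omega, by omega, hget⟩)
            have hnc2 : ¬ ((k : Int) + 1 ≤ (N : Int) - 1 ∧ PySem.List.pyGetD s ((k : Int) + 1) 0 = 0) := by
              rintro ⟨hle, hget⟩
              rw [(by omega : ((k : Int) + 1) = ((k + 1 : Nat) : Int)),
                PySem.List.pyGetD_natCast] at hget
              exact hz2 ((hz _).2 ⟨k + 1, by omega, by omega, hget⟩)
            simp only [PySem.List.pyGetD_natCast] at hnc1 hnc2 ⊢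
            rw [if_pos h2, if_neg hnc1, if_neg hnc2]
          have hB : stepB z ((k : Int)) = z := by
            unfold stepB
            rw [if_neg hz1, if_neg hz2]
          rw [hA, hB]
          apply ih (k + 1) s z T' (by omega) hlen hnd (List.pairwise_cons.1 hpw).2 hbound' hz
          intro j hj hjN'
          rw [hT j (by omega) hjN', List.mem_cons]
          constructor
          · rintro (h | h)
            · omega
            · exact h
          · intro h; exact Or.inr h
    · -- no lending at index k
      have hA : stepAL (N : Int) s (k : Int) = s := by
        unfold stepAL
        rw [PySem.List.pyGetD_natCast, if_neg h2]
      rw [hA]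
      have hnotT : ((k : Int)) ∉ T := fun h => h2 ((hT k le_rfl hkN).2 h)
      apply ih (k + 1) s z T (by omega) hlen hnd hpw ?_ hz ?_
      · intro x hx
        have hb := hbound x hx
        have hne : x ≠ (k : Int) := by rintro rfl; exact hnotT hx
        push_cast
        omega
      · intro j hj hjN'
        exact hT j (by omega) hjN'

lemma foldl_stepB_nil (T : List Int) : T.foldl stepB [] = [] := by
  induction T with
  | nil => rfl
  | cons r T ih => simpa [stepB] using ih

lemma discard_cons_ne (l x : Int) (z : List Int) (h : l ≠ x) :
    PySem.Set.discard (l :: z) x = l :: PySem.Set.discard z x := by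
  simp only [PySem.Set.discard]
  rw [List.filter_cons_of_pos (by simp [h])]

lemma discard_cons_self (l : Int) (z : List Int) (hlz : ∀ x ∈ z, l < x) :
    PySem.Set.discard (l :: z) l = z := by
  simp only [PySem.Set.discard]
  rw [List.filter_cons_of_neg (by simp),
    List.filter_eq_self.2 (fun x hx => by simp; have := hlz x hx; omega)]

-- an element smaller than every trigger's neighbourhood survives the whole greedy untouched
lemma foldl_stepB_cons_stale (l : Int) : ∀ (T z : List Int),
    (∀ x ∈ T, l ≠ x - 1 ∧ l ≠ x + 1) →
    T.foldl stepB (l :: z) = l :: T.foldl stepB z := by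
  intro T
  induction T with
  | nil => intro z _; rfl
  | cons r T ih =>
    intro z hc
    obtain ⟨h1, h2⟩ := hc r (List.mem_cons_self ..)
    have hne1 : r - 1 ≠ l := fun h => h1 h.symm
    have hne2 : r + 1 ≠ l := fun h => h2 h.symm
    have hstep : stepB (l :: z) r = l :: stepB z r := by
      unfold stepB
      simp only [List.mem_cons, hne1, hne2, false_or]
      split_ifs with hA hB
      · exact discard_cons_ne l (r - 1) z h1
      · exact discard_cons_ne l (r + 1) z h2
      · rfl
    simp only [List.foldl_cons, hstep]
    exact ih _ (fun x hx => hc x (List.mem_cons_of_mem _ hx))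

-- A's greedy removes exactly the two-pointer matching count from the zero set
lemma foldl_stepB_length : ∀ (fuel : Nat) (z T : List Int), z.length + T.length ≤ fuel →
    z.Pairwise (· < ·) → T.Pairwise (· < ·) → (∀ x ∈ z, x ∉ T) →
    ((T.foldl stepB z).length : Int) = (z.length : Int) - twoPtr z T := by
  intro fuel
  induction fuel with
  | zero =>
    intro z T hle _ _ _
    have hz : z = [] := List.eq_nil_of_length_eq_zero (by omega)
    have hT : T = [] := List.eq_nil_of_length_eq_zero (by omega)
    subst hz hT
    simp [twoPtr]
  | succ fuel ih =>
    intro z T hle hpz hpT hdis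
    cases z with
    | nil => simp [foldl_stepB_nil, twoPtr]
    | cons l z' =>
      cases T with
      | nil => simp [twoPtr]
      | cons r T' =>
        obtain ⟨hlz, hpz'⟩ := List.pairwise_cons.1 hpz
        obtain ⟨hrT, hpT'⟩ := List.pairwise_cons.1 hpT
        have hlr : l ≠ r := fun h => (hdis l (List.mem_cons_self ..)) (h ▸ List.mem_cons_self ..)
        have hdis' : ∀ x ∈ z', x ∉ (r :: T') := fun x hx => hdis x (List.mem_cons_of_mem _ hx)
        have hlnotz' : l ∉ z' := fun h => absurd (hlz l h) (lt_irrefl l)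
        rcases lt_trichotomy l r with hlt | heq | hgt
        · rcases eq_or_lt_of_le (by omega : l + 1 ≤ r) with heq1 | hlt2
          · -- l = r - 1: matched, lend left
            have hstep : stepB (l :: z') r = z' := by
              unfold stepB
              rw [if_pos (by rw [show r - 1 = l from by omega]; exact List.mem_cons_self ..)]
              rw [show r - 1 = l from by omega]
              exact discard_cons_self l z' hlz
            have htp : twoPtr (l :: z') (r :: T') = 1 + twoPtr z' T' := by
              simp only [twoPtr]
              rw [if_pos (by omega)]
            simp only [List.foldl_cons, hstep, htp]
            have := ih z' T' (by simp at hle ⊢; omega) hpz' hpT'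
              (fun x hx => fun hm => hdis' x hx (List.mem_cons_of_mem _ hm))
            simp only [List.length_cons]
            push_cast
            omega
          · -- l < r - 1: l is stale for every trigger
            have hstale : ∀ x ∈ (r :: T'), l ≠ x - 1 ∧ l ≠ x + 1 := by
              intro x hx
              rcases List.mem_cons.1 hx with rfl | hx'
              · omega
              · have := hrT x hx'; omega
            rw [foldl_stepB_cons_stale l _ _ hstale]
            have htp : twoPtr (l :: z') (r :: T') = twoPtr z' (r :: T') := by
              simp only [twoPtr]
              rw [if_neg (by omega), if_pos hlt]
            have := ih z' (r :: T') (by simp at hle ⊢; omega) hpz' hpT hdis'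
            simp only [List.length_cons, htp]
            push_cast at this ⊢
            omega
        · exact absurd heq hlr
        · rcases eq_or_lt_of_le (by omega : r + 1 ≤ l) with heq1 | hlt2
          · -- l = r + 1: matched, lend right (r-1 < l is below every zero)
            have hstep : stepB (l :: z') r = z' := by
              unfold stepB
              have hnm : r - 1 ∉ (l :: z') := by
                simp only [List.mem_cons]
                rintro (h | h)
                · omega
                · have := hlz _ h; omega
              rw [if_neg hnm, if_pos (by rw [show r + 1 = l from by omega]; exact List.mem_cons_self ..)]
              rw [show r + 1 = l from by omega]
              exact discard_cons_self l z' hlz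
            have htp : twoPtr (l :: z') (r :: T') = 1 + twoPtr z' T' := by
              simp only [twoPtr]
              rw [if_pos (by omega)]
            simp only [List.foldl_cons, hstep, htp]
            have := ih z' T' (by simp at hle ⊢; omega) hpz' hpT'
              (fun x hx => fun hm => hdis' x hx (List.mem_cons_of_mem _ hm))
            simp only [List.length_cons]
            push_cast
            omega
          · -- r < l - 1: the trigger r finds no zero at r±1
            have hstep : stepB (l :: z') r = l :: z' := by
              unfold stepB
              have hnm1 : r - 1 ∉ (l :: z') := by
                simp only [List.mem_cons]
                rintro (h | h)
                · omega
                · have := hlz _ h; omega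
              have hnm2 : r + 1 ∉ (l :: z') := by
                simp only [List.mem_cons]
                rintro (h | h)
                · omega
                · have := hlz _ h; omega
              rw [if_neg hnm1, if_neg hnm2]
            have htp : twoPtr (l :: z') (r :: T') = twoPtr (l :: z') T' := by
              simp only [twoPtr]
              rw [if_neg (by omega), if_neg (by omega)]
            simp only [List.foldl_cons, hstep, htp]
            exact ih (l :: z') T' (by simp at hle ⊢; omega) hpz hpT'
              (fun x hx => fun hm => hdis x hx (List.mem_cons_of_mem _ hm))

-- positions extracted from an enumerated list: increasing, and exactly where the value is c
lemma zipIdx_filter_spec (c : Int) : ∀ (l : List Int) (k : Nat),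
    ((((l.zipIdx k).filter (fun p => p.1 == c)).map (fun p => ((p.2 : Nat) : Int))).Pairwise (· < ·))
    ∧ (∀ x : Int,
        x ∈ ((l.zipIdx k).filter (fun p => p.1 == c)).map (fun p => ((p.2 : Nat) : Int))
          ↔ ∃ j : Nat, k ≤ j ∧ j < k + l.length ∧ x = (j : Int) ∧ l.getD (j - k) 0 = c) := by
  intro l
  induction l with
  | nil =>
    intro k
    refine ⟨by simp, fun x => ?_⟩
    simp
    intro j h1 h2
    exact absurd h2 (by omega)
  | cons a t ih =>
    intro k
    obtain ⟨ihp, ihm⟩ := ih (k + 1)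
    have hz : (a :: t).zipIdx k = (a, k) :: t.zipIdx (k + 1) := rfl
    constructor
    · rw [hz]
      by_cases hc : a = c
      · rw [List.filter_cons_of_pos (by simp [hc]), List.map_cons]
        refine List.pairwise_cons.2 ⟨?_, ihp⟩
        intro x hx
        obtain ⟨j, hj1, _, rfl, _⟩ := (ihm x).1 hx
        omega
      · rw [List.filter_cons_of_neg (by simp [hc])]
        exact ihp
    · intro x
      rw [hz]
      by_cases hc : a = c
      · rw [List.filter_cons_of_pos (by simp [hc]), List.map_cons, List.mem_cons, ihm x]
        constructor
        · rintro (rfl | ⟨j, hj1, hj2, rfl, hg⟩)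
          · exact ⟨k, le_rfl, by simp, rfl, by simpa [Nat.sub_self] using hc⟩
          · refine ⟨j, by omega, by simp only [List.length_cons]; omega, rfl, ?_⟩
            obtain ⟨m, hm⟩ : ∃ m, j - k = m + 1 := ⟨j - (k + 1), by omega⟩
            rw [hm, List.getD_cons_succ, show m = j - (k + 1) from by omega]
            exact hg
        · rintro ⟨j, hj1, hj2, rfl, hg⟩
          rcases eq_or_lt_of_le hj1 with rfl | hlt
          · exact Or.inl rfl
          · refine Or.inr ⟨j, by omega, by simp only [List.length_cons] at hj2; omega, rfl, ?_⟩
            obtain ⟨m, hm⟩ : ∃ m, j - k = m + 1 := ⟨j - (k + 1), by omega⟩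
            rw [hm, List.getD_cons_succ] at hg
            rw [show j - (k + 1) = m from by omega]
            exact hg
      · rw [List.filter_cons_of_neg (by simp [hc]), ihm x]
        constructor
        · rintro ⟨j, hj1, hj2, rfl, hg⟩
          refine ⟨j, by omega, by simp only [List.length_cons]; omega, rfl, ?_⟩
          obtain ⟨m, hm⟩ : ∃ m, j - k = m + 1 := ⟨j - (k + 1), by omega⟩
          rw [hm, List.getD_cons_succ, show m = j - (k + 1) from by omega]
          exact hg
        · rintro ⟨j, hj1, hj2, rfl, hg⟩
          rcases eq_or_lt_of_le hj1 with rfl | hlt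
          · rw [Nat.sub_self, List.getD_cons_zero] at hg
            exact absurd hg hc
          · refine ⟨j, by omega, by simp only [List.length_cons] at hj2; omega, rfl, ?_⟩
            obtain ⟨m, hm⟩ : ∃ m, j - k = m + 1 := ⟨j - (k + 1), by omega⟩
            rw [hm, List.getD_cons_succ] at hg
            rw [show j - (k + 1) = m from by omega]
            exact hg

-- ===== VERDICT (by name: the statement is the Claim_ definition above) =====
theorem solution_spec : Claim_equal_solution := by
  unfold Claim_equal_solution
  intro n lost reserve _hdom hpre
  unfold Spec_solution
  obtain ⟨hl, hr⟩ := hpre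
  by_cases hn : 0 ≤ n
  · -- main case: n ≥ 0, every entry is an actual student number 1..n
    have hnN : n = (n.toNat : Int) := by omega
    set N := n.toNat with hNdef
    rw [hnN] at hl hr ⊢
    simp only [solution, solution_alt]
    rw [PySem.List.pyRange_zero_natCast]
    -- A: initial array [1]*n
    have hmap1 : ((List.range N).map (Nat.cast : Nat → Int)).map (fun _ => (1 : Int))
        = List.replicate N (1 : Int) := by
      rw [List.map_map]
      simp [Function.comp_def, List.map_const']
    rw [hmap1]
    -- A: carry the array state over to its list of entries
    rw [foldl_toList (stepA ((N : Nat) : Int)) (stepAL ((N : Nat) : Int)) (stepA_toList _)]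
    rw [foldl_toList _ (fun s r => PySem.List.pySetD s (r - 1) (PySem.List.pyGetD s (r - 1) 0 + 1))
      (fun a x => by simp only [pyASetD_toList, pyAGetD_toList])]
    rw [foldl_toList _ (fun s l => PySem.List.pySetD s (l - 1) (PySem.List.pyGetD s (l - 1) 0 - 1))
      (fun a x => by simp only [pyASetD_toList, pyAGetD_toList])]
    rw [List.toList_toArray]
    -- A: the two building passes
    have hcgL : ∀ (s0 : List Int),
        (PySem.List.sorted lost (fun x => x)).foldl
          (fun t l => PySem.List.pySetD t (l - 1) (PySem.List.pyGetD t (l - 1) 0 - 1)) s0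
        = (PySem.List.sorted lost (fun x => x)).foldl
          (fun t l => PySem.List.pySetD t (l - 1) (PySem.List.pyGetD t (l - 1) 0 + (-1))) s0 :=
      fun s0 => PySem.List.foldl_congr_mem _ _ _ s0 (fun acc x _ => by simp [sub_eq_add_neg])
    rw [hcgL]
    have hpermL := PySem.List.sorted_perm lost (fun x => x) false
    have hpermR := PySem.List.sorted_perm reserve (fun x => x) false
    have hLb : ∀ x ∈ PySem.List.sorted lost (fun x => x),
        1 - ((List.replicate N (1 : Int)).length : Int)
          ≤ x ∧ x ≤ ((List.replicate N (1 : Int)).length : Int) := by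
      intro x hx
      have := hl x (hpermL.mem_iff.1 hx)
      simp only [List.length_replicate]
      omega
    obtain ⟨hlen1, hget1⟩ := build_fold (-1) (PySem.List.sorted lost (fun x => x))
      (List.replicate N (1 : Int)) hLb
    set s1 := (PySem.List.sorted lost (fun x => x)).foldl
      (fun t l => PySem.List.pySetD t (l - 1) (PySem.List.pyGetD t (l - 1) 0 + (-1)))
      (List.replicate N (1 : Int)) with hs1
    have hlen1' : s1.length = N := by rw [hlen1]; simp
    have hRb : ∀ x ∈ PySem.List.sorted reserve (fun x => x),
        1 - (s1.length : Int) ≤ x ∧ x ≤ (s1.length : Int) := by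
      intro x hx
      have := hr x (hpermR.mem_iff.1 hx)
      rw [hlen1']
      omega
    obtain ⟨hlen2, hget2⟩ := build_fold 1 (PySem.List.sorted reserve (fun x => x)) s1 hRb
    set s2 := (PySem.List.sorted reserve (fun x => x)).foldl
      (fun t r => PySem.List.pySetD t (r - 1) (PySem.List.pyGetD t (r - 1) 0 + 1)) s1 with hs2
    have hlen2' : s2.length = N := by rw [hlen2, hlen1']
    simp only [List.length_replicate] at hget1
    simp only [hlen1'] at hget2
    have hgets2 : ∀ j : Nat, j < N → s2.getD j 0 = 1 + cntP lost reserve N ((j : Int)) := by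
      intro j hj
      rw [hget2 j hj, hget1 j hj]
      rw [show (List.replicate N (1 : Int)).getD j 0 = 1 from by simp [List.getD, hj]]
      rw [hpermL.countP_eq, hpermR.countP_eq]
      unfold cntP
      ring
    -- B: carry the balance array over to its list of entries
    rw [foldl_toList _ (fun b x => PySem.List.pySetD b (x - 1) (PySem.List.pyGetD b (x - 1) 0 + 1))
      (fun a x => by simp only [pyASetD_toList, pyAGetD_toList])]
    rw [foldl_toList _ (fun b x => PySem.List.pySetD b (x - 1) (PySem.List.pyGetD b (x - 1) 0 - 1))
      (fun a x => by simp only [pyASetD_toList, pyAGetD_toList])]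
    rw [List.toList_toArray, Int.toNat_natCast]
    -- B: the two balance-building passes
    have hcgB : ∀ (s0 : List Int),
        lost.foldl (fun b x => PySem.List.pySetD b (x - 1) (PySem.List.pyGetD b (x - 1) 0 - 1)) s0
        = lost.foldl (fun b x => PySem.List.pySetD b (x - 1) (PySem.List.pyGetD b (x - 1) 0 + (-1))) s0 :=
      fun s0 => PySem.List.foldl_congr_mem _ _ _ s0 (fun acc x _ => by simp [sub_eq_add_neg])
    rw [hcgB]
    have hLb' : ∀ x ∈ lost, 1 - ((List.replicate N (0 : Int)).length : Int) ≤ x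
        ∧ x ≤ ((List.replicate N (0 : Int)).length : Int) := by
      intro x hx
      have := hl x hx
      simp only [List.length_replicate]
      omega
    obtain ⟨hblen1, hbget1⟩ := build_fold (-1) lost (List.replicate N (0 : Int)) hLb'
    set b1 := lost.foldl
      (fun t l => PySem.List.pySetD t (l - 1) (PySem.List.pyGetD t (l - 1) 0 + (-1)))
      (List.replicate N (0 : Int)) with hb1
    have hblen1' : b1.length = N := by rw [hblen1]; simp
    have hRb' : ∀ x ∈ reserve, 1 - (b1.length : Int) ≤ x ∧ x ≤ (b1.length : Int) := by
      intro x hx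
      have := hr x hx
      rw [hblen1']
      omega
    obtain ⟨hblen2, hbget2⟩ := build_fold 1 reserve b1 hRb'
    set b2 := reserve.foldl
      (fun t r => PySem.List.pySetD t (r - 1) (PySem.List.pyGetD t (r - 1) 0 + 1)) b1 with hb2
    have hblen2' : b2.length = N := by rw [hblen2, hblen1']
    simp only [List.length_replicate] at hbget1
    simp only [hblen1'] at hbget2
    have hbal : ∀ j : Nat, j < N → b2.getD j 0 = cntP lost reserve N ((j : Int)) := by
      intro j hj
      rw [hbget2 j hj, hbget1 j hj,
        show (List.replicate N (0 : Int)).getD j 0 = 0 from by simp [List.getD, hj]]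
      unfold cntP
      ring
    -- B: need / spare, the increasing position lists
    set need := ((b2.zipIdx.filter (fun p => p.1 == (-1 : Int))).map (fun p => ((p.2 : Nat) : Int)))
      with hneed
    set spare := ((b2.zipIdx.filter (fun p => p.1 == (1 : Int))).map (fun p => ((p.2 : Nat) : Int)))
      with hspare
    obtain ⟨hpwN, hmemN0⟩ := zipIdx_filter_spec (-1) b2 0
    obtain ⟨hpwS, hmemS0⟩ := zipIdx_filter_spec 1 b2 0
    have hmemN : ∀ x : Int, x ∈ need ↔ ∃ j : Nat, j < N ∧ x = (j : Int) ∧ b2.getD j 0 = -1 := by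
      intro x
      rw [hneed, hmemN0 x]
      constructor
      · rintro ⟨j, _, hj2, rfl, hg⟩
        exact ⟨j, by omega, rfl, by simpa using hg⟩
      · rintro ⟨j, hj, rfl, hg⟩
        exact ⟨j, by omega, by omega, rfl, by simpa using hg⟩
    have hmemS : ∀ x : Int, x ∈ spare ↔ ∃ j : Nat, j < N ∧ x = (j : Int) ∧ b2.getD j 0 = 1 := by
      intro x
      rw [hspare, hmemS0 x]
      constructor
      · rintro ⟨j, _, hj2, rfl, hg⟩
        exact ⟨j, by omega, rfl, by simpa using hg⟩
      · rintro ⟨j, hj, rfl, hg⟩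
        exact ⟨j, by omega, by omega, rfl, by simpa using hg⟩
    have hndN : need.Nodup := hpwN.imp (fun h => ne_of_lt h)
    have hboundS : ∀ x ∈ spare, ((0 : Nat) : Int) ≤ x ∧ x < ((N : Nat) : Int) := by
      intro x hx
      obtain ⟨j, hj, rfl, _⟩ := (hmemS x).1 hx
      push_cast
      omega
    have hdis : ∀ x ∈ need, x ∉ spare := by
      intro x hx hxS
      obtain ⟨j, hj, rfl, hg⟩ := (hmemN x).1 hx
      obtain ⟨j', _, hjj, hg'⟩ := (hmemS _).1 hxS
      have : j' = j := by omega
      subst this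
      omega
    have hz0 : ∀ x : Int, x ∈ need ↔ ∃ j : Nat, j < N ∧ x = (j : Int) ∧ s2.getD j 0 = 0 := by
      intro x
      rw [hmemN x]
      constructor
      · rintro ⟨j, hj, rfl, hg⟩
        refine ⟨j, hj, rfl, ?_⟩
        rw [hgets2 j hj]
        rw [hbal j hj] at hg
        omega
      · rintro ⟨j, hj, rfl, h0⟩
        refine ⟨j, hj, rfl, ?_⟩
        rw [hbal j hj]
        rw [hgets2 j hj] at h0
        omega
    have hT0s : ∀ j : Nat, 0 ≤ j → j < N → (s2.getD j 0 = 2 ↔ ((j : Int)) ∈ spare) := by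
      intro j _ hj
      rw [hgets2 j hj, hmemS]
      constructor
      · intro h
        refine ⟨j, hj, rfl, ?_⟩
        rw [hbal j hj]
        omega
      · rintro ⟨j', hj', hjj, hg'⟩
        have : j' = j := by omega
        subst this
        rw [hbal j' hj'] at hg'
        omega
    have hmain := greedy_core N N 0 s2 need spare (by omega) hlen2' hndN hpwS hboundS hz0 hT0s
    rw [← List.range_eq_range'] at hmain
    -- the greedy leaves |need| - twoPtr need spare zeros
    have hlenfold := foldl_stepB_length (need.length + spare.length) need spare le_rfl hpwN hpwS hdis
    rw [PySem.List.count_eq]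
    rw [show (fun (k : Nat) => (k : Int)) = (Nat.cast : Nat → Int) from rfl]
    rw [hlenfold] at hmain
    omega
  · -- n < 0: Pre_ forces both lists empty; both sides return n
    have hln : lost = [] := by
      cases lost with
      | nil => rfl
      | cons a t => have := hl a (List.mem_cons_self ..); omega
    have hrn : reserve = [] := by
      cases reserve with
      | nil => rfl
      | cons a t => have := hr a (List.mem_cons_self ..); omega
    subst hln hrn
    have hrange : PySem.List.pyRange 0 n = [] := by
      simp [PySem.List.pyRange]
      omega
    have ht : n.toNat = 0 := by omega
    simp [solution, solution_alt, hrange, PySem.List.sorted, PySem.List.count, ht, twoPtr]
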